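-- pv_equiv track=rewrite | github.com/neverMEH/amazon-helper | scripts/build_guide_formatter.py | _format_sql_query
-- ===== SOURCE A (Python) =====
-- def _format_sql_query(sql: str) -> str:
--     """Basic SQL query formatting"""
--     # Remove excessive whitespace while preserving structure
--     lines = sql.split('\n')
--     formatted_lines = []
--
--     for line in lines:
--         # Preserve indentation for readability
--         stripped = line.strip()
--         if stripped:
--             formatted_lines.append(line)
--         elif formatted_lines:  # Preserve single blank lines
--             formatted_lines.append('')
--
--     return '\n'.join(formatted_lines)
-- ===== SOURCE B (Python) =====
-- def _format_sql_query(sql: str) -> str: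
--     """Basic SQL query formatting"""
--     # Phase 1: drop leading whitespace-only lines; Phase 2: blank lines -> ''.
--     lines = sql.split('\n')
--     i = 0
--     while i < len(lines) and not lines[i].strip():
--         i += 1
--     return '\n'.join(line if line.strip() else '' for line in lines[i:])
-- ===== Notes on version B (the rewrite author's own statement) =====
-- stated objective: simpler
-- what changed: Replaces A's single accumulator loop (which uses 'emitted anything yet' as a proxy for leading-blank trimming) with two explicit phases: drop the leading whitespace-only lines, then map each remaining line to itself or to an empty line and join.
import Mathlib
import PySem

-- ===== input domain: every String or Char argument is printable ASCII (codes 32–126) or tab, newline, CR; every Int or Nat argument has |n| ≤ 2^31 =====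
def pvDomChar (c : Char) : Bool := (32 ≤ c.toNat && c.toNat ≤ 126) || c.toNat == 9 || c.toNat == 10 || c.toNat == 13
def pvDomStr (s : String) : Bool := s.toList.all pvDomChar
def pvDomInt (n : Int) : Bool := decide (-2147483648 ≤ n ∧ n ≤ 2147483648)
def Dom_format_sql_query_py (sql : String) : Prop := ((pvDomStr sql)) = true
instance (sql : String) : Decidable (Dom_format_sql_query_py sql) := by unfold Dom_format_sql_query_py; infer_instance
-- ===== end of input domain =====

-- B splits A's accumulator loop into two phases (drop leading blank lines, then map blank lines to empty); objective: simpler.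


-- ===== PORT A =====
def format_sql_query_py (sql : String) : String :=
  let lines := PySem.Chars.splitOn sql.toList ['\n']
  let formatted_lines := lines.foldl (fun acc line =>
    if PySem.Chars.strip line ≠ [] then acc ++ [line]
    else if acc ≠ [] then acc ++ [([] : List Char)] else acc) []
  String.ofList (PySem.Chars.join ['\n'] formatted_lines)

-- ===== PORT B =====
def format_sql_query_py_alt (sql : String) : String :=
  let lines := PySem.Chars.splitOn sql.toList ['\n']
  let rest := lines.dropWhile (fun l => PySem.Chars.strip l == [])
  String.ofList (PySem.Chars.join ['\n']
    (rest.map (fun l => if PySem.Chars.strip l == [] then [] else l)))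

-- ===== PRECONDITION & SPEC =====
def Spec_format_sql_query_py (sql : String) (out : String) : Prop := out = format_sql_query_py_alt sql
instance (sql : String) (out : String) : Decidable (Spec_format_sql_query_py sql out) := by unfold Spec_format_sql_query_py; infer_instance

-- ===== CLAIM (what is proved, stated in full; the proofs are below) =====
def Claim_equal_format_sql_query_py : Prop := ∀ (sql : String), Dom_format_sql_query_py sql → Spec_format_sql_query_py sql (format_sql_query_py sql)

-- ===== LEMMAS AND PROOFS =====

-- ===== VERDICT (by name: the statement is the Claim_ definition above) =====
theorem fold_nonempty (ls : List (List Char)) (acc : List (List Char)) (h : acc ≠ []) :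
    ls.foldl (fun acc line =>
      if PySem.Chars.strip line ≠ [] then acc ++ [line]
      else if acc ≠ [] then acc ++ [([] : List Char)] else acc) acc
    = acc ++ ls.map (fun l => if PySem.Chars.strip l == [] then [] else l) := by
  induction ls generalizing acc with
  | nil => simp
  | cons hd tl ih =>
    simp only [List.foldl_cons, List.map_cons]
    by_cases hb : PySem.Chars.strip hd = []
    · rw [show (if PySem.Chars.strip hd ≠ [] then acc ++ [hd]
            else if acc ≠ [] then acc ++ [([] : List Char)] else acc) = acc ++ [[]]
            from by simp [hb, h],
          ih (acc ++ [[]]) (by simp)]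
      simp [hb]
    · rw [show (if PySem.Chars.strip hd ≠ [] then acc ++ [hd]
            else if acc ≠ [] then acc ++ [([] : List Char)] else acc) = acc ++ [hd]
            from by simp [hb],
          ih (acc ++ [hd]) (by simp), List.append_assoc]
      simp [hb]

theorem fold_empty (ls : List (List Char)) :
    ls.foldl (fun acc line =>
      if PySem.Chars.strip line ≠ [] then acc ++ [line]
      else if acc ≠ [] then acc ++ [([] : List Char)] else acc) []
    = (ls.dropWhile (fun l => PySem.Chars.strip l == [])).map
        (fun l => if PySem.Chars.strip l == [] then [] else l) := by
  induction ls with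
  | nil => simp
  | cons hd tl ih =>
    simp only [List.foldl_cons, List.dropWhile_cons]
    by_cases hb : PySem.Chars.strip hd = []
    · simpa [hb] using ih
    · rw [show (if PySem.Chars.strip hd ≠ [] then ([] : List (List Char)) ++ [hd]
            else if ([] : List (List Char)) ≠ [] then ([] : List (List Char)) ++ [[]] else ([] : List (List Char))) = [hd]
            from by simp [hb],
          fold_nonempty tl [hd] (by simp)]
      simp [hb]

theorem format_sql_query_py_spec : Claim_equal_format_sql_query_py := by
  intro sql _
  unfold Spec_format_sql_query_py format_sql_query_py format_sql_query_py_alt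
  exact congrArg (fun l => String.ofList (PySem.Chars.join ['\n'] l)) (fold_empty _)
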